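-- pv_equiv track=rewrite | github.com/albertoceballos/nand2tetris | projects/07/VMTranslator.py | get_segment_and_segment_num
-- ===== SOURCE A (Python) =====
-- def get_segment_and_segment_num(data,start):
--     # temp variables
--     segment = ""
--     segment_num = -1
--     temp = ""
--     # iterate over string
--     for i in range(start,len(data)):
--         # when you reach the space you find segment
--         if data[i] == " " or data[i] == "\n" or data[i] == "/":
--             if segment == "":
--                 segment = temp
--                 temp = ""
--             else:
--                 segment_num = int(temp)
--                 break
--         else:
--             temp += data[i]
--
--     return segment, segment_num
-- ===== SOURCE B (Python) =====
-- def get_segment_and_segment_num(data, start):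
--     # normalize delimiters to spaces, skip leading ones, then split off two tokens
--     t = data[start:].replace("\n", " ").replace("/", " ").lstrip(" ")
--     segment, sep, rest = t.partition(" ")
--     if not sep:
--         return "", -1
--     num_str, sep2, _ = rest.partition(" ")
--     return segment, int(num_str) if sep2 else -1
-- ===== Notes on version B (the rewrite author's own statement) =====
-- stated objective: idiomatic
-- what changed: Replaces the character-by-character state machine (segment/temp accumulators with a break flag) by normalizing all three delimiters to spaces, lstrip-ing, and splitting off the two tokens with str.partition; same O(n) work but done by C-implemented string primitives instead of a per-character Python loop.
-- outside the precondition, e.g. on get_segment_and_segment_num('a b', -1): A returns ('ba', -1), B returns ('', -1)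
import Mathlib
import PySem

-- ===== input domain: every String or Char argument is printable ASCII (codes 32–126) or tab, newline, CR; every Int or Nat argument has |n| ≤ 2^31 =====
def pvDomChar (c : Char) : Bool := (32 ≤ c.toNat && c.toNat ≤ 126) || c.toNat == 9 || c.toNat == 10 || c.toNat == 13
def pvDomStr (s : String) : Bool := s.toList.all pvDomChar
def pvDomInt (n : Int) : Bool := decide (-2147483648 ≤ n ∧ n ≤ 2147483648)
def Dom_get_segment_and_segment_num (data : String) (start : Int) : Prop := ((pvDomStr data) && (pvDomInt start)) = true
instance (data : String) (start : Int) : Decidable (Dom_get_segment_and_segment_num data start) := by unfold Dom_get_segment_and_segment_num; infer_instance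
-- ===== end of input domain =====

-- B replaces A's char-by-char state machine by delimiter normalization + lstrip + two str.partition calls (idiomatic; same cost).

-- ===== PORT A =====
-- one loop step of A: state = (segment, segment_num, temp, broke); strings carried as List Char
def pvStepA (st : List Char × Int × List Char × Bool) (c : Char) : List Char × Int × List Char × Bool :=
  match st with
  | (seg, num, temp, true) => (seg, num, temp, true)   -- after 'break'
  | (seg, num, temp, false) =>
    if c = ' ' || c = '\n' || c = '/' then
      if seg = [] then (temp, num, [], false)
      else (seg, (PySem.Int.ofChars? temp).getD 0, temp, true)  -- int(temp); none = ValueError, excluded by Pre_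
    else (seg, num, temp ++ [c], false)

def get_segment_and_segment_num (data : String) (start : Int) : String × Int :=
  let cs := data.toList
  -- for i in range(start, len(data)): data[i] via pyGetD (index always in range when 0 ≤ start; default unused there)
  let r := (PySem.List.pyRange start (PySem.List.len cs)).foldl
    (fun st i => pvStepA st (PySem.List.pyGetD cs i ' ')) ([], -1, [], false)
  (String.ofList r.1, r.2.1)

-- ===== PORT B =====
def get_segment_and_segment_num_alt (data : String) (start : Int) : String × Int :=
  -- data[start:].replace("\n"," ").replace("/"," "): single-char replaces, done on code points
  let s := PySem.List.slice data.toList (some start) none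
  let t0 := (s.map (fun c => if c = '\n' then ' ' else c)).map (fun c => if c = '/' then ' ' else c)
  let t := t0.dropWhile (fun c => c == ' ')                -- .lstrip(" "): exact for the single strip char
  -- t.partition(" "): exact hand port for a single-char separator
  let segment := t.takeWhile (fun c => c != ' ')
  match t.dropWhile (fun c => c != ' ') with
  | [] => ("", -1)                                         -- sep == "" : no delimiter after the first token
  | _ :: rest =>
    let numStr := rest.takeWhile (fun c => c != ' ')
    match rest.dropWhile (fun c => c != ' ') with
    | [] => (String.ofList segment, -1)                        -- sep2 == ""
    | _ :: _ => (String.ofList segment, (PySem.Int.ofChars? numStr).getD 0)  -- int(num_str); none excluded by Pre_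

-- ===== PRECONDITION & SPEC =====
def pvDelim (c : Char) : Bool := c == ' ' || c == '\n' || c == '/'

-- Pre_ restricts to the function's natural domain 0 ≤ start (for negative start A's negative-index
-- wraparound scans a wrapped suffix and then the whole string again — an accident of indexing; see cites),
-- and excludes the inputs where A raises ValueError: a second delimiter whose preceding run of characters
-- is not a valid int literal (including the empty run).
def Pre_get_segment_and_segment_num (data : String) (start : Int) : Prop :=
  0 ≤ start ∧
  (let l1 := (data.toList.drop start.toNat).dropWhile pvDelim
   let r := l1.dropWhile (fun c => !pvDelim c)
   r ≠ [] → r.tail.dropWhile (fun c => !pvDelim c) ≠ [] →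
     (PySem.Int.ofChars? (r.tail.takeWhile (fun c => !pvDelim c))).isSome)
instance (data : String) (start : Int) : Decidable (Pre_get_segment_and_segment_num data start) := by unfold Pre_get_segment_and_segment_num; infer_instance

def pvWitness_get_segment_and_segment_num : String × Int := ("push 7\n", 0)

def Spec_get_segment_and_segment_num (data : String) (start : Int) (out : String × Int) : Prop := out = get_segment_and_segment_num_alt data start
instance (data : String) (start : Int) (out : String × Int) : Decidable (Spec_get_segment_and_segment_num data start out) := by unfold Spec_get_segment_and_segment_num; infer_instance

-- ===== CLAIM (what is proved, stated in full; the proofs are below) =====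
def Claim_equal_get_segment_and_segment_num : Prop := ∀ (data : String) (start : Int), Dom_get_segment_and_segment_num data start → Pre_get_segment_and_segment_num data start → Spec_get_segment_and_segment_num data start (get_segment_and_segment_num data start)

-- ===== LEMMAS AND PROOFS =====

-- after the break flag is set, the fold is constant
lemma pvA_break (l : List Char) (seg : List Char) (num : Int) (temp : List Char) :
    l.foldl pvStepA (seg, num, temp, true) = (seg, num, temp, true) := by
  induction l with
  | nil => rfl
  | cons c l ih => simpa [pvStepA] using ih

-- phase 0: leading delimiters are absorbed by the initial state
lemma pvA_phase0 (l : List Char) :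
    l.foldl pvStepA ([], -1, [], false) = (l.dropWhile pvDelim).foldl pvStepA ([], -1, [], false) := by
  induction l with
  | nil => rfl
  | cons c l ih =>
    by_cases h : pvDelim c = true
    · have h' : (c = ' ' || c = '\n' || c = '/') = true := by
        simpa [pvDelim, decide_eq_true_eq] using h
      simp [List.dropWhile_cons, h, List.foldl_cons, pvStepA, h', ih]
    · simp [List.dropWhile_cons, h]

-- phase 1: segment still empty, accumulating temp
lemma pvA_phase1 (l : List Char) (temp : List Char) :
    l.foldl pvStepA ([], -1, temp, false) =
      (match l.dropWhile (fun c => !pvDelim c) with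
       | [] => ([], -1, temp ++ l.takeWhile (fun c => !pvDelim c), false)
       | _ :: r' => if temp ++ l.takeWhile (fun c => !pvDelim c) = [] then
                      r'.foldl pvStepA ([], -1, [], false)
                    else r'.foldl pvStepA (temp ++ l.takeWhile (fun c => !pvDelim c), -1, [], false)) := by
  induction l generalizing temp with
  | nil => simp
  | cons c l ih =>
    by_cases h : pvDelim c = true
    · have h' : (c = ' ' || c = '\n' || c = '/') = true := by
        simpa [pvDelim, decide_eq_true_eq] using h
      have hstep : pvStepA ([], -1, temp, false) c = (temp, -1, [], false) := by
        simp [pvStepA, h']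
      have hd : (fun c => !pvDelim c) c = false := by simp [h]
      simp only [List.dropWhile_cons, List.takeWhile_cons, hd, List.foldl_cons, hstep,
        Bool.false_eq_true, if_false]
      by_cases ht : temp = [] <;> simp [ht]
    · have h' : (c = ' ' || c = '\n' || c = '/') = false := by
        simpa [pvDelim, decide_eq_true_eq] using h
      have hstep : pvStepA ([], -1, temp, false) c = ([], -1, temp ++ [c], false) := by
        simp [pvStepA, h']
      have hd : (fun c => !pvDelim c) c = true := by simp [h]
      simp only [List.dropWhile_cons, List.takeWhile_cons, hd, List.foldl_cons, hstep, if_true]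
      rw [ih (temp ++ [c])]
      simp

-- phase 2: segment set (nonempty), accumulating the number's characters
lemma pvA_phase2 (l : List Char) (seg : List Char) (temp : List Char) (hseg : seg ≠ []) :
    l.foldl pvStepA (seg, -1, temp, false) =
      (match l.dropWhile (fun c => !pvDelim c) with
       | [] => (seg, -1, temp ++ l.takeWhile (fun c => !pvDelim c), false)
       | _ :: r' => r'.foldl pvStepA
           (seg, (PySem.Int.ofChars? (temp ++ l.takeWhile (fun c => !pvDelim c))).getD 0,
            temp ++ l.takeWhile (fun c => !pvDelim c), true)) := by
  induction l generalizing temp with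
  | nil => simp
  | cons c l ih =>
    by_cases h : pvDelim c = true
    · have h' : (c = ' ' || c = '\n' || c = '/') = true := by
        simpa [pvDelim, decide_eq_true_eq] using h
      have hstep : pvStepA (seg, -1, temp, false) c =
          (seg, (PySem.Int.ofChars? temp).getD 0, temp, true) := by
        simp [pvStepA, h', hseg]
      have hd : (fun c => !pvDelim c) c = false := by simp [h]
      simp only [List.dropWhile_cons, List.takeWhile_cons, hd, List.foldl_cons, hstep,
        Bool.false_eq_true, if_false]
      simp
    · have h' : (c = ' ' || c = '\n' || c = '/') = false := by
        simpa [pvDelim, decide_eq_true_eq] using h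
      have hstep : pvStepA (seg, -1, temp, false) c = (seg, -1, temp ++ [c], false) := by
        simp [pvStepA, h']
      have hd : (fun c => !pvDelim c) c = true := by simp [h]
      simp only [List.dropWhile_cons, List.takeWhile_cons, hd, List.foldl_cons, hstep, if_true]
      rw [ih (temp ++ [c])]
      simp

-- the two replaces turn a char into ' ' exactly on the delimiters
lemma pvMap_eq (c : Char) :
    (if (if c = '\n' then ' ' else c) = '/' then ' ' else if c = '\n' then ' ' else c) =
      (if pvDelim c then ' ' else c) := by
  by_cases h1 : c = '\n' <;> by_cases h2 : c = '/' <;> by_cases h3 : c = ' ' <;>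
    simp_all [pvDelim]

lemma pvMapped (l : List Char) :
    (l.map (fun c => if c = '\n' then ' ' else c)).map (fun c => if c = '/' then ' ' else c) =
      l.map (fun c => if pvDelim c then ' ' else c) := by
  rw [List.map_map]; exact List.map_congr_left (fun c _ => pvMap_eq c)

lemma pvDropWhile_mapped (l : List Char) :
    (l.map (fun c => if pvDelim c then ' ' else c)).dropWhile (fun c => c == ' ') =
      (l.dropWhile pvDelim).map (fun c => if pvDelim c then ' ' else c) := by
  induction l with
  | nil => rfl
  | cons c l ih =>
    by_cases h : pvDelim c = true
    · have hm : ((if pvDelim c then ' ' else c) == ' ') = true := by simp [h]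
      simp [List.dropWhile_cons, hm, h, ih]
    · have hc : c ≠ ' ' := by intro hc; simp [hc, pvDelim] at h
      have hm : ((if pvDelim c then ' ' else c) == ' ') = false := by simp [h, hc]
      simp [List.dropWhile_cons, hm, h, hc]

lemma pvTakeWhile_mapped (l : List Char) :
    (l.map (fun c => if pvDelim c then ' ' else c)).takeWhile (fun c => c != ' ') =
      l.takeWhile (fun c => !pvDelim c) := by
  induction l with
  | nil => rfl
  | cons c l ih =>
    by_cases h : pvDelim c = true
    · have hm : ((if pvDelim c then ' ' else c) != ' ') = false := by simp [h]
      have h2 : (!pvDelim c) = false := by simp [h]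
      simp [List.takeWhile_cons, hm, h2]
    · have hc : c ≠ ' ' := by intro hc; simp [hc, pvDelim] at h
      have hm : ((if pvDelim c then ' ' else c) != ' ') = true := by simp [h, hc]
      have h2 : (!pvDelim c) = true := by simp [h]
      simp [List.takeWhile_cons, hm, h2, h, hc, ih]

lemma pvDropWhile_mapped' (l : List Char) :
    (l.map (fun c => if pvDelim c then ' ' else c)).dropWhile (fun c => c != ' ') =
      (l.dropWhile (fun c => !pvDelim c)).map (fun c => if pvDelim c then ' ' else c) := by
  induction l with
  | nil => rfl
  | cons c l ih =>
    by_cases h : pvDelim c = true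
    · have hm : ((if pvDelim c then ' ' else c) != ' ') = false := by simp [h]
      have h2 : (!pvDelim c) = false := by simp [h]
      simp [List.dropWhile_cons, hm, h2]
    · have hc : c ≠ ' ' := by intro hc; simp [hc, pvDelim] at h
      have hm : ((if pvDelim c then ' ' else c) != ' ') = true := by simp [h, hc]
      have h2 : (!pvDelim c) = true := by simp [h]
      simp [List.dropWhile_cons, hm, h2, ih]

-- the head of dropWhile p does not satisfy p
lemma pvHead_dropWhile {p : Char → Bool} {l : List Char} {c : Char} {t : List Char}
    (h : l.dropWhile p = c :: t) : p c = false := by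
  induction l with
  | nil => simp at h
  | cons a l ih =>
    rw [List.dropWhile_cons] at h
    by_cases hp : p a = true
    · rw [if_pos hp] at h; exact ih h
    · rw [if_neg hp] at h
      obtain ⟨rfl, -⟩ := List.cons.injEq .. ▸ h
      simpa using hp

-- ===== VERDICT (by name: the statement is the Claim_ definition above) =====
theorem get_segment_and_segment_num_spec : Claim_equal_get_segment_and_segment_num := by
  intro data start _ hpre
  obtain ⟨hs, _⟩ := hpre
  unfold Spec_get_segment_and_segment_num
  simp only [get_segment_and_segment_num, get_segment_and_segment_num_alt]
  rw [PySem.List.foldl_pyRange_pyGetD data.toList ' ' pvStepA ([], -1, [], false) hs]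
  rw [PySem.List.slice_from data.toList hs]
  set l : List Char := data.toList.drop start.toNat with hl
  rw [pvMapped, pvDropWhile_mapped, pvA_phase0]
  set l1 : List Char := l.dropWhile pvDelim with hl1
  rw [pvTakeWhile_mapped, pvDropWhile_mapped', pvA_phase1]
  have htw : l1.takeWhile (fun c => !pvDelim c) = l1.takeWhile (fun c => !pvDelim c) := rfl
  rcases hr : l1.dropWhile (fun c => !pvDelim c) with _ | ⟨d, r'⟩
  · simp
  · -- a delimiter follows the first token; the token is nonempty since l1 starts with a non-delimiter
    have hne : l1.takeWhile (fun c => !pvDelim c) ≠ [] := by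
      rcases hl1' : l1 with _ | ⟨c, t⟩
      · simp [hl1'] at hr
      · have hc : pvDelim c = false := pvHead_dropWhile (hl1 ▸ hl1')
        simp [hl1', List.takeWhile_cons, hc]
    simp only [List.nil_append, hne, ite_false]
    rw [pvA_phase2 r' _ [] hne]
    simp only [List.map_cons, List.nil_append]
    rw [pvTakeWhile_mapped, pvDropWhile_mapped']
    rcases hr2 : r'.dropWhile (fun c => !pvDelim c) with _ | ⟨d2, r2⟩
    · simp
    · simp [pvA_break]
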